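-- pv_equiv track=rewrite | github.com/zdodds/contributed-submissions | submissions_cs35_sp2025/submission_352/final|hw0pr1 .py | obish
-- ===== SOURCE A (Python) =====
-- def obish(s):
--     '''
--     Input: a string, s
--     Output: the string converted to obish (https://www.instructables.com/How-to-speak-Obish/)
--     '''
--     vowels = 'aeiouy'
--     outputStr = ""
--     for i in s:
--         if i in vowels:
--             outputStr += "ob"
--         outputStr += i
--     return outputStr
-- ===== SOURCE B (Python) =====
-- def obish(s):
--     '''
--     Input: a string, s
--     Output: the string converted to obish (prefix 'ob' before each vowel)
--
--     Scans for vowel positions and assembles the output from whole slices of s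
--     plus 'ob' markers, instead of building it character by character.
--     '''
--     vowels = 'aeiouy'
--     parts = []
--     prev = 0
--     for i, c in enumerate(s):
--         if c in vowels:
--             parts.append(s[prev:i])
--             parts.append('ob')
--             prev = i
--     parts.append(s[prev:])
--     return ''.join(parts)
-- ===== Notes on version B (the rewrite author's own statement) =====
-- stated objective: alternative
-- what changed: Instead of A's per-character accumulator that appends the marker and each character one by one, B scans for vowel positions and assembles the output by joining whole slices of s between consecutive vowels with marker strings, copying non-vowel runs in bulk.
import Mathlib
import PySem

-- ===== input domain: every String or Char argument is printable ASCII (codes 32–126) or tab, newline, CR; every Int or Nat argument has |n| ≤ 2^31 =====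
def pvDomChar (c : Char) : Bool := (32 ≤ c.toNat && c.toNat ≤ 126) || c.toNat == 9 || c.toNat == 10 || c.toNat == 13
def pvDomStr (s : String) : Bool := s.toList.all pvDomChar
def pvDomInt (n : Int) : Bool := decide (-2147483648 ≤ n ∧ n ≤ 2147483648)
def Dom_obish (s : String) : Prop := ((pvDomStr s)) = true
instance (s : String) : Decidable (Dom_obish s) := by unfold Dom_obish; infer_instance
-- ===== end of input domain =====

-- B replaces A's per-character accumulator by a scan for vowel positions that joins
-- whole slices of s between consecutive vowels with 'ob' markers (objective: alternative).

-- ===== PORT A =====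
-- strings are handled as their character lists; the accumulator is outputStr
def obishGo (acc : List Char) (c : Char) : List Char :=
  (if c ∈ "aeiouy".toList then acc ++ ['o', 'b'] else acc) ++ [c]

def obish (s : String) : String :=
  String.ofList (s.toList.foldl obishGo [])

-- ===== PORT B =====
-- loop body: state is (parts, prev); on a vowel at index i append s[prev:i] and 'ob', set prev = i
def obishAltStep (l : List Char) (st : List (List Char) × Int) (ic : Int × Char) :
    List (List Char) × Int :=
  if ic.2 ∈ "aeiouy".toList then
    (st.1 ++ [PySem.List.slice l (some st.2) (some ic.1), ['o', 'b']], ic.1)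
  else st

-- parts.append(s[prev:]); return ''.join(parts)
def obishJoin (l : List Char) (st : List (List Char) × Int) : List Char :=
  (st.1 ++ [PySem.List.slice l (some st.2) none]).flatten

-- for i, c in enumerate(s): …
def obish_alt (s : String) : String :=
  String.ofList
    (obishJoin s.toList ((PySem.List.enumerate s.toList 0).foldl (obishAltStep s.toList) ([], 0)))

-- ===== PRECONDITION & SPEC =====
def Spec_obish (s : String) (out : String) : Prop := out = obish_alt s
instance (s : String) (out : String) : Decidable (Spec_obish s out) := by unfold Spec_obish; infer_instance

-- ===== CLAIM (what is proved, stated in full; the proofs are below) =====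
def Claim_equal_obish : Prop := ∀ (s : String), Dom_obish s → Spec_obish s (obish s)

-- ===== LEMMAS AND PROOFS =====
-- the per-character contribution both programs produce for a character
def obishF (c : Char) : List Char :=
  (if c ∈ "aeiouy".toList then ['o', 'b'] else []) ++ [c]

theorem obishF_pos (c : Char) (h : c ∈ "aeiouy".toList) : obishF c = ['o', 'b', c] := by
  unfold obishF; rw [if_pos h]; rfl

theorem obishF_neg (c : Char) (h : c ∉ "aeiouy".toList) : obishF c = [c] := by
  unfold obishF; rw [if_neg h]; rfl

theorem obish_foldl_eq (l : List Char) (acc : List Char) :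
    l.foldl obishGo acc = acc ++ l.flatMap obishF := by
  induction l generalizing acc with
  | nil => simp
  | cons c t ih =>
      simp only [List.foldl_cons, List.flatMap_cons, ih, obishGo, obishF]
      split_ifs <;> simp

-- loop invariant of B: after the suffix l.drop k is processed from state (parts, prev),
-- joining the final parts yields the parts so far ++ the pending run s[prev:k] ++ the
-- translation of the suffix
theorem obish_alt_invariant (l : List Char) (t : List Char) (k prev : Nat)
    (parts : List (List Char)) (ht : l.drop k = t) (hp : prev ≤ k) :
    obishJoin l ((PySem.List.enumerate t (k : Int)).foldl (obishAltStep l) (parts, (prev : Int)))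
      = parts.flatten ++ (l.drop prev).take (k - prev) ++ t.flatMap obishF := by
  induction t generalizing k prev parts with
  | nil =>
      have hk : l.length ≤ k := List.drop_eq_nil_iff.mp ht
      simp only [PySem.List.enumerate, List.foldl_nil, List.flatMap_nil, List.append_nil,
        obishJoin]
      rw [PySem.List.slice_from_natCast]
      have : (l.drop prev).take (k - prev) = l.drop prev := by
        apply List.take_of_length_le
        simp; omega
      simp [this]
  | cons c rest ih =>
      have hk : k < l.length := by
        by_contra h
        rw [List.drop_eq_nil_iff.mpr (by omega)] at ht
        exact (List.cons_ne_nil c rest) ht.symm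
      have hcq : l[k]? = some c := by
        have h0 := congrArg (fun u => u[0]?) ht
        simpa using h0
      have hc : l[k] = c := by
        rw [List.getElem?_eq_getElem hk] at hcq
        exact Option.some.inj hcq
      have hrest : l.drop (k + 1) = rest := by
        have h1 : l.drop (k + 1) = (l.drop k).drop 1 := by rw [List.drop_drop]
        rw [h1, ht]; rfl
      rw [PySem.List.enumerate_cons, List.foldl_cons]
      have hcast : ((k : Int) + 1) = ((k + 1 : Nat) : Int) := by push_cast; ring
      by_cases hv : c ∈ "aeiouy".toList
      · have hstep : obishAltStep l (parts, (prev : Int)) ((k : Int), c)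
            = (parts ++ [PySem.List.slice l (some (prev : Int)) (some (k : Int)), ['o', 'b']],
               (k : Int)) := by
          simp only [obishAltStep]; rw [if_pos hv]
        rw [hstep, hcast, ih (k + 1) k _ hrest (by omega)]
        rw [PySem.List.slice_natCast]
        have htake1 : (l.drop k).take (k + 1 - k) = [c] := by
          rw [ht]; simp
        rw [htake1]
        simp [List.flatMap_cons, obishF_pos c hv]
      · have hstep : obishAltStep l (parts, (prev : Int)) ((k : Int), c) = (parts, (prev : Int)) := by
          simp only [obishAltStep]; rw [if_neg hv]
        rw [hstep, hcast, ih (k + 1) prev parts hrest (by omega)]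
        have hsucc : (l.drop prev).take (k + 1 - prev) = (l.drop prev).take (k - prev) ++ [c] := by
          have hgq : (l.drop prev)[k - prev]? = some c := by
            rw [List.getElem?_drop, show prev + (k - prev) = k by omega]
            exact hcq
          rw [show k + 1 - prev = (k - prev) + 1 by omega, List.take_add_one, hgq]
          rfl
        rw [hsucc]
        simp [List.flatMap_cons, obishF_neg c hv]

-- ===== VERDICT (by name: the statement is the Claim_ definition above) =====
theorem obish_spec : Claim_equal_obish := by
  intro s _
  unfold Spec_obish obish obish_alt
  rw [obish_foldl_eq]
  have h := obish_alt_invariant s.toList s.toList 0 0 [] (by simp) (Nat.le_refl 0)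
  simp only [Nat.cast_zero] at h
  rw [h]
  simp
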